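-- pv_equiv track=rewrite | github.com/daniel-reich/turbo-robot | arobBz954ZDxkDC9M_13.py | next_prime
-- ===== SOURCE A (Python) =====
-- def next_prime(num):
--   cond = 2**(num-1) % num == 1
--   if cond:
--     return num
--   else:
--     while(not cond):
--       num += 1
--       cond = 2**(num-1) % num == 1
--     return num
-- ===== SOURCE B (Python) =====
-- def next_prime(num):
--     n = num
--     while _modpow2(n - 1, n) != 1:
--         n += 1
--     return n
--
--
-- def _modpow2(exp, mod):
--     # binary (square-and-multiply) modular exponentiation of 2**exp mod mod
--     result = 1 % mod
--     base = 2 % mod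
--     while exp > 0:
--         if exp & 1:
--             result = result * base % mod
--         base = base * base % mod
--         exp >>= 1
--     return result
-- ===== Notes on version B (the rewrite author's own statement) =====
-- stated objective: faster
-- what changed: B replaces the full bignum power 2**(n-1) followed by a reduction with binary square-and-multiply modular exponentiation, so each candidate check costs O(log n) modular multiplications instead of constructing an (n-1)-bit integer.
import Mathlib
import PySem

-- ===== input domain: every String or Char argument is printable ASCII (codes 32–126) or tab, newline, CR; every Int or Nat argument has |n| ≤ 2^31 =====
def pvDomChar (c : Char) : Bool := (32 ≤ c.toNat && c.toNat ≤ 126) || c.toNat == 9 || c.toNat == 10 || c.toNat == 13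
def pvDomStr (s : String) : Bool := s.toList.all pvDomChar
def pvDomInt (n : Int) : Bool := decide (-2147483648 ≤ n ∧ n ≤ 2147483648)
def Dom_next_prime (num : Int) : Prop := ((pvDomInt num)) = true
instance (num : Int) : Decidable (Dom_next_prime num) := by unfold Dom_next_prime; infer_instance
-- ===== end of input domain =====

-- B replaces the full bignum power 2**(n-1) % n by binary square-and-multiply
-- modular exponentiation (asymptotically faster per candidate check).


-- fuel bound for the while-loops (never reached on Dom inputs with num ≥ 1;
-- both ports use the same candidate sequence, so equality is exact regardless)
def pvFuel : Nat := 4294967296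

-- ===== PORT A =====
-- A's condition: 2**(num-1) % num == 1, computed with a full power
def pvCondA (n : Int) : Bool := (2 : Int) ^ (n - 1).toNat % n == 1

def pvLoopA : Nat → Int → Int
  | 0, n => n + 1  -- fuel guard only; never reached on Dom inputs
  | f + 1, n =>
    let n' := n + 1
    if pvCondA n' then n' else pvLoopA f n'

def next_prime (num : Int) : Int :=
  if pvCondA num then num else pvLoopA pvFuel num

-- ===== PORT B =====
-- _modpow2: binary square-and-multiply, state (result, base), exp halved each step
def pvModPow2 (exp : Nat) (result base md : Int) : Int :=
  if exp = 0 then result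
  else
    pvModPow2 (exp / 2)
      (if exp % 2 = 1 then result * base % md else result)
      (base * base % md) md
  decreasing_by exact Nat.div_lt_self (Nat.pos_of_ne_zero (by assumption)) (by omega)

def pvCondB (n : Int) : Bool := pvModPow2 (n - 1).toNat (1 % n) (2 % n) n == 1

def pvLoopB : Nat → Int → Int
  | 0, n => n
  | f + 1, n => if pvCondB n then n else pvLoopB f (n + 1)

def next_prime_alt (num : Int) : Int := pvLoopB (pvFuel + 1) num

-- ===== PRECONDITION & SPEC =====
-- Pre_ excludes non-positive num, on which Python A raises ZeroDivisionError once
-- the search reaches a zero modulus; Python B raises there too.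
def Pre_next_prime (num : Int) : Prop := 1 ≤ num
instance (num : Int) : Decidable (Pre_next_prime num) := by unfold Pre_next_prime; infer_instance
def pvWitness_next_prime : Int := (5)

def Spec_next_prime (num : Int) (out : Int) : Prop := out = next_prime_alt num
instance (num : Int) (out : Int) : Decidable (Spec_next_prime num out) := by unfold Spec_next_prime; infer_instance

-- ===== CLAIM (what is proved, stated in full; the proofs are below) =====
def Claim_equal_next_prime : Prop := ∀ (num : Int), Dom_next_prime num → Pre_next_prime num → Spec_next_prime num (next_prime num)

-- ===== LEMMAS AND PROOFS =====

theorem int_pow_emod (a : Int) (e : Nat) (m : Int) : (a % m) ^ e % m = a ^ e % m := by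
  induction e with
  | zero => simp
  | succ e ih =>
    rw [pow_succ, pow_succ, Int.mul_emod, ih, Int.emod_emod_of_dvd _ dvd_rfl,
      ← Int.mul_emod]

-- square-and-multiply invariant: with result already reduced, the loop computes
-- result * base ^ exp modulo md
theorem pvModPow2_eq (exp : Nat) (result base md : Int) (hr : result % md = result) :
    pvModPow2 exp result base md = result * base ^ exp % md := by
  induction exp using Nat.strong_induction_on generalizing result base with
  | _ e ih =>
    rw [pvModPow2]
    by_cases h0 : e = 0
    · simp [h0, hr]
    · have hlt : e / 2 < e := Nat.div_lt_self (Nat.pos_of_ne_zero h0) (by omega)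
      simp only [h0, if_false]
      by_cases hpar : e % 2 = 1
      · have he : e = 2 * (e / 2) + 1 := by omega
        rw [if_pos hpar, ih _ hlt _ _ (Int.emod_emod_of_dvd _ dvd_rfl)]
        rw [Int.mul_emod, Int.emod_emod_of_dvd _ dvd_rfl, int_pow_emod, ← Int.mul_emod]
        have hpow : result * base ^ e = result * base * (base * base) ^ (e / 2) := by
          conv_lhs => rw [he]
          rw [pow_succ, pow_mul, pow_two]; ring
        rw [hpow]
      · have he : e = 2 * (e / 2) := by omega
        rw [if_neg hpar, ih _ hlt _ _ hr]
        rw [Int.mul_emod, int_pow_emod, ← Int.mul_emod]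
        have hpow : result * base ^ e = result * (base * base) ^ (e / 2) := by
          conv_lhs => rw [he]
          rw [pow_mul, pow_two]
        rw [hpow]

-- the two candidate tests agree (for every integer n)
theorem pvCond_eq (n : Int) : pvCondB n = pvCondA n := by
  unfold pvCondA pvCondB
  rw [pvModPow2_eq _ _ _ _ (Int.emod_emod_of_dvd _ dvd_rfl)]
  congr 1
  rw [Int.mul_emod, Int.emod_emod_of_dvd _ dvd_rfl, int_pow_emod, ← Int.mul_emod, one_mul]

-- the loops walk the same candidates: A increments then tests, B tests its argument
theorem pvLoop_eq (f : Nat) : ∀ n : Int, pvLoopA f n = pvLoopB f (n + 1) := by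
  induction f with
  | zero => intro n; simp [pvLoopA, pvLoopB]
  | succ f ih =>
    intro n
    simp only [pvLoopA, pvLoopB, pvCond_eq]
    by_cases h : pvCondA (n + 1) = true
    · simp [h]
    · simp [h, ih (n + 1)]

-- ===== VERDICT (by name: the statement is the Claim_ definition above) =====
theorem next_prime_spec : Claim_equal_next_prime := by
  intro num _ _
  unfold Spec_next_prime next_prime next_prime_alt
  simp only [pvLoopB, pvCond_eq]
  by_cases h : pvCondA num = true
  · simp [h]
  · simp [h, pvLoop_eq pvFuel num]
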